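-- pv_equiv track=rewrite | github.com/Osama-Alamri/Graduation-Project | tests/t.py | process_ner_results
-- ===== SOURCE A (Python) =====
-- def process_ner_results(results):
--     """A simple function to group entity words together."""
--     entities = {}
--     current_entity = None
--     current_text = ""
--
--     for result in results:
--         entity_label = result['entity'].split('-')[-1]  # Get the base label (e.g., 'SKILLS' from 'B-SKILLS')
--         word = result['word']
--
--         # If the word starts with ##, it's a sub-word, so we attach it to the previous word
--         if word.startswith("##"):
--             current_text += word.lstrip("##")
--         else:
--             # If we are starting a new entity, save the old one first
--             if current_entity and current_text:
--                 if current_entity not in entities: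
--                     entities[current_entity] = []
--                 entities[current_entity].append(current_text)
--
--             # Start a new entity
--             current_entity = entity_label
--             current_text = word
--
--     # Add the last entity
--     if current_entity and current_text:
--         if current_entity not in entities:
--             entities[current_entity] = []
--         entities[current_entity].append(current_text)
--
--     return entities
-- ===== SOURCE B (Python) =====
-- def process_ner_results(results):
--     """Group entity words by greedy segmentation: skip leading subword tokens,
--     then for each word-start token scan forward over its '##' continuations,
--     join them into the full word and insert it into the dict immediately."""
--     entities = {}
--     n = len(results)
--     i = 0
--     while i < n and results[i]['word'].startswith('##'):
--         i += 1
--     while i < n: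
--         label = results[i]['entity'].split('-')[-1]
--         parts = [results[i]['word']]
--         j = i + 1
--         while j < n and results[j]['word'].startswith('##'):
--             parts.append(results[j]['word'].lstrip('##'))
--             j += 1
--         text = ''.join(parts)
--         if label and text:
--             entities.setdefault(label, []).append(text)
--         i = j
--     return entities
-- ===== Notes on version B (the rewrite author's own statement) =====
-- stated objective: alternative
-- what changed: A carries a pending (current_entity, current_text) across one stateful pass and flushes it into the dict at each boundary and at the end; B has no pending state: it skips leading subword tokens, then greedily segments the stream, scanning forward with an inner loop over each word's '##' continuations, joining them into the complete word and inserting it into the dict immediately.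
import Mathlib
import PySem

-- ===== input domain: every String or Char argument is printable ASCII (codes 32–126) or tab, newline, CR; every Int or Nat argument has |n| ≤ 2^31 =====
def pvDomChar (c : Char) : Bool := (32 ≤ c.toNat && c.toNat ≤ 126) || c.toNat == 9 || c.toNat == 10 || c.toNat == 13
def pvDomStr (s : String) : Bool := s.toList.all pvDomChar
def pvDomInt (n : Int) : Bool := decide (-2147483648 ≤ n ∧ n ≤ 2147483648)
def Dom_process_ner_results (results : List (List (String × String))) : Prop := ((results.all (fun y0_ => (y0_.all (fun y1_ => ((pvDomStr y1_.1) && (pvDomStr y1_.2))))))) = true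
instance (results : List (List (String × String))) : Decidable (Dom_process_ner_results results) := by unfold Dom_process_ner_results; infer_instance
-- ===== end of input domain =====

-- B replaces A's stateful carry of a pending (entity, text) by greedy segmentation:
-- skip leading '##' tokens, then scan each word's '##' continuations with an inner
-- loop and insert the joined word into the dict at once; objective: alternative, same cost.
-- Texts are carried as List Char (the PySem string side); String.ofList wraps at store time.

-- ===== PORT A =====

-- result['entity'].split('-')[-1]; split of a nonempty separator is never empty, so getD "" never fires
def pvLabelOf (result : List (String × String)) : String :=
  (PySem.List.pyGet? ((PySem.Str.split? ((result.lookup "entity").getD "") "-").getD []) (-1)).getD ""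

-- word.lstrip("##") strips ALL leading '#' characters (on the List Char side; exact)
def pvLstripHash (w : List Char) : List Char := w.dropWhile (· == '#')

-- the "save the old entity" block: if current_entity and current_text: … append(current_text)
def pvFlushA (entities : PySem.Dict String (List String)) (ce : Option String) (ct : List Char) :
    PySem.Dict String (List String) :=
  match ce with
  | none => entities
  | some s =>
    if s ≠ "" ∧ ct ≠ [] then
      let entities := if entities.contains s then entities else entities.insert s []
      entities.insert s (entities.getD s [] ++ [String.ofList ct])
    else entities

-- one iteration of A's loop over (entities, current_entity, current_text)
def pvStepA (st : PySem.Dict String (List String) × Option String × List Char)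
    (result : List (String × String)) :
    PySem.Dict String (List String) × Option String × List Char :=
  if PySem.Str.startswith ((result.lookup "word").getD "") "##" then
    (st.1, st.2.1, st.2.2 ++ pvLstripHash ((result.lookup "word").getD "").toList)
  else
    (pvFlushA st.1 st.2.1 st.2.2, some (pvLabelOf result), ((result.lookup "word").getD "").toList)

def process_ner_results (results : List (List (String × String))) : List (String × List String) :=
  (pvFlushA (results.foldl pvStepA (PySem.Dict.empty, none, [])).1
    (results.foldl pvStepA (PySem.Dict.empty, none, [])).2.1
    (results.foldl pvStepA (PySem.Dict.empty, none, [])).2.2).items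

-- ===== PORT B =====

-- results[i]['word'].startswith('##'), the guard of B's inner/skip loops
def pvIsHash (result : List (String × String)) : Bool :=
  PySem.Str.startswith ((result.lookup "word").getD "") "##"

-- ''.join(results[j]['word'].lstrip('##') for the collected continuation tokens)
def pvJoinStrips (subs : List (List (String × String))) : List Char :=
  (subs.map (fun r => pvLstripHash ((r.lookup "word").getD "").toList)).flatten

-- if label and text: entities.setdefault(label, []).append(text)
def pvGroupStep (d : PySem.Dict String (List String)) (p : String × List Char) :
    PySem.Dict String (List String) :=
  if p.1 ≠ "" ∧ p.2 ≠ [] then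
    let d := d.setdefault p.1 []
    d.insert p.1 (d.getD p.1 [] ++ [String.ofList p.2])
  else d

-- B's outer while loop: head token starts a word; takeWhile/dropWhile are its inner scan
def pvLoopB (e : PySem.Dict String (List String)) :
    List (List (String × String)) → PySem.Dict String (List String)
  | [] => e
  | r :: rest =>
    pvLoopB
      (pvGroupStep e (pvLabelOf r,
        ((r.lookup "word").getD "").toList ++ pvJoinStrips (rest.takeWhile pvIsHash)))
      (rest.dropWhile pvIsHash)
termination_by l => l.length
decreasing_by
  simp only [List.length_cons]
  exact Nat.lt_succ_of_le (List.length_dropWhile_le _ _)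

def process_ner_results_alt (results : List (List (String × String))) : List (String × List String) :=
  (pvLoopB PySem.Dict.empty (results.dropWhile pvIsHash)).items

-- ===== PRECONDITION & SPEC =====
-- Pre_ excludes exactly the inputs where the Python A raises KeyError: some result dict
-- lacking the key 'entity' or the key 'word'.
def Pre_process_ner_results (results : List (List (String × String))) : Prop :=
  ∀ r ∈ results, (r.lookup "entity").isSome ∧ (r.lookup "word").isSome
instance (results : List (List (String × String))) : Decidable (Pre_process_ner_results results) := by unfold Pre_process_ner_results; infer_instance

def pvWitness_process_ner_results : (List (List (String × String))) :=
  [[("entity", "B-SKILLS"), ("word", "python")], [("entity", "I-SKILLS"), ("word", "##ic")]]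

def Spec_process_ner_results (results : List (List (String × String))) (out : List (String × List String)) : Prop := out = process_ner_results_alt results
instance (results : List (List (String × String))) (out : List (String × List String)) : Decidable (Spec_process_ner_results results out) := by unfold Spec_process_ner_results; infer_instance

-- ===== CLAIM (what is proved, stated in full; the proofs are below) =====
def Claim_equal_process_ner_results : Prop := ∀ (results : List (List (String × String))), Dom_process_ner_results results → Pre_process_ner_results results → Spec_process_ner_results results (process_ner_results results)

-- ===== LEMMAS AND PROOFS =====

-- the two branches of A's loop body, as rewrite rules over literal state tuples
theorem pvStepA_hash (e : PySem.Dict String (List String)) (ce : Option String) (ct : List Char)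
    (r : List (String × String)) (h : pvIsHash r = true) :
    pvStepA (e, ce, ct) r = (e, ce, ct ++ pvLstripHash ((r.lookup "word").getD "").toList) := by
  simp only [pvIsHash] at h; unfold pvStepA; rw [if_pos h]

theorem pvStepA_word (e : PySem.Dict String (List String)) (ce : Option String) (ct : List Char)
    (r : List (String × String)) (h : ¬ pvIsHash r = true) :
    pvStepA (e, ce, ct) r = (pvFlushA e ce ct, some (pvLabelOf r), ((r.lookup "word").getD "").toList) := by
  simp only [pvIsHash] at h; unfold pvStepA; rw [if_neg h]

-- A's flush equals B's grouping step, reading A's Option-valued label through getD "".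
theorem pvFlush_eq (e : PySem.Dict String (List String)) (ce : Option String) (ct : List Char) :
    pvFlushA e ce ct = pvGroupStep e (ce.getD "", ct) := by
  cases ce with
  | none => simp [pvFlushA, pvGroupStep]
  | some s =>
    by_cases h : s ≠ "" ∧ ct ≠ []
    · by_cases hc : e.contains s
      · simp [pvFlushA, pvGroupStep, h, hc, PySem.Dict.setdefault_of_contains e ([] : List String) hc]
      · simp [pvFlushA, pvGroupStep, h, hc,
              PySem.Dict.setdefault_of_not_contains e ([] : List String) (by simpa using hc),
              PySem.Dict.getD_insert_self]
    · simp [pvFlushA, pvGroupStep, h]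

-- main invariant: A's fold-then-flush from any state (e, ce, ct) equals B's chunked loop,
-- with the pending word (ce, ct + the stripped leading '##' run of rs) flushed first.
theorem pv_main (rs : List (List (String × String))) (e : PySem.Dict String (List String))
    (ce : Option String) (ct : List Char) :
    pvFlushA (rs.foldl pvStepA (e, ce, ct)).1 (rs.foldl pvStepA (e, ce, ct)).2.1
        (rs.foldl pvStepA (e, ce, ct)).2.2 =
      pvLoopB (pvGroupStep e (ce.getD "", ct ++ pvJoinStrips (rs.takeWhile pvIsHash)))
        (rs.dropWhile pvIsHash) := by
  induction rs generalizing e ce ct with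
  | nil => simpa [pvLoopB, pvJoinStrips] using pvFlush_eq e ce ct
  | cons r rs ih =>
    by_cases h : pvIsHash r = true
    · rw [List.foldl_cons, pvStepA_hash _ _ _ r h]
      rw [ih e ce _]
      simp [h, pvJoinStrips]
    · rw [List.foldl_cons, pvStepA_word _ _ _ r h]
      rw [ih _ _ _]
      have hd : (r :: rs).dropWhile pvIsHash = r :: rs := by
        simp [h]
      have ht : (r :: rs).takeWhile pvIsHash = [] := by
        simp [h]
      rw [hd, ht, pvLoopB, pvFlush_eq e ce ct]
      simp [pvJoinStrips]

-- ===== VERDICT (by name: the statement is the Claim_ definition above) =====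
theorem process_ner_results_spec : Claim_equal_process_ner_results := by
  intro results _ _
  show process_ner_results results = process_ner_results_alt results
  unfold process_ner_results process_ner_results_alt
  rw [pv_main results PySem.Dict.empty none []]
  simp [pvGroupStep]
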